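-- pv_equiv track=rewrite | github.com/KaileZhu/KaileZhu | JK_game/planning/src/ltl_mas/tools/utils.py | counter_node_regions
-- ===== SOURCE A (Python) =====
-- import collections
--
-- def counter_node_regions(nodes):
--     nodes_set=[]
--     regions_set={}
--     for node in nodes:
--         nodes_set.append(node[0])
--     node_dic=collections.Counter(nodes_set)
--     for key,number in node_dic.items():
--         regions_set[key]=(number,[i for i,x in enumerate(nodes_set) if x==key],
--                           dict(collections.Counter([nodes[i][1] for i,x in enumerate(nodes_set) if x==key])))
--     return regions_set
-- ===== SOURCE B (Python) =====
-- def counter_node_regions(nodes):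
--     # single incremental pass: aggregate count, indices and subtype counts per key
--     regions_set = {}
--     for i, node in enumerate(nodes):
--         key, sub = node[0], node[1]
--         if key in regions_set:
--             cnt, idxs, subs = regions_set[key]
--             idxs.append(i)
--             subs[sub] = subs.get(sub, 0) + 1
--             regions_set[key] = (cnt + 1, idxs, subs)
--         else:
--             regions_set[key] = (1, [i], {sub: 1})
--     return regions_set
-- ===== Notes on version B (the rewrite author's own statement) =====
-- stated objective: faster
-- what changed: Replaces Counter-then-rescan (a full enumerate scan of nodes per distinct key, twice) by one incremental pass that maintains count, index list and subtype counter per key in a single dict.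
import Mathlib
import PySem

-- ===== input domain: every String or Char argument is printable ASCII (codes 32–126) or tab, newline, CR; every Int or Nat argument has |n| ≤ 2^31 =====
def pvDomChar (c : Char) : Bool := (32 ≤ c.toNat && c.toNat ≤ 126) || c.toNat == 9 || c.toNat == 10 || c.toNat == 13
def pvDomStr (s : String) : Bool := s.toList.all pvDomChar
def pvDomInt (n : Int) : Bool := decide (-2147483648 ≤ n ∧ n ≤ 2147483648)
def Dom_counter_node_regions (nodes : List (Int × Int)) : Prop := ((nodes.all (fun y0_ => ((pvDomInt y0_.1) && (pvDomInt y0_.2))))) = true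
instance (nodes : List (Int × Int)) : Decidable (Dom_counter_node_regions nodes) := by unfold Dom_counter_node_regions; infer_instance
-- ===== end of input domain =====

-- B replaces A's Counter-then-rescan-per-key by one incremental pass over enumerate(nodes) (faster; A also mutates nothing, so return-value equivalence is full equivalence).


-- ===== PORT A =====
def counter_node_regions (nodes : List (Int × Int)) : List (Int × Int × List Int × (List (Int × Int))) :=
  let nodes_set : List Int := nodes.foldl (fun acc node => acc ++ [node.1]) []
  let node_dic : PySem.Dict Int Int := PySem.Dict.counter nodes_set
  let regions_set : PySem.Dict Int (Int × List Int × List (Int × Int)) :=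
    node_dic.items.foldl (fun r kv =>
      r.insert kv.1 (kv.2,
        ((PySem.List.enumerate nodes_set 0).filter (fun p => p.2 == kv.1)).map (·.1),
        -- nodes[i]: every enumerate index is in range, so pyGetD's default is never used
        (PySem.Dict.counter (((PySem.List.enumerate nodes_set 0).filter (fun p => p.2 == kv.1)).map
          (fun p => (PySem.List.pyGetD nodes p.1 (0, 0)).2))).items))
      PySem.Dict.empty
  regions_set.items

-- ===== PORT B =====
def counter_node_regions_alt (nodes : List (Int × Int)) : List (Int × Int × List Int × (List (Int × Int))) :=
  let regions_set : PySem.Dict Int (Int × List Int × PySem.Dict Int Int) :=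
    (PySem.List.enumerate nodes 0).foldl (fun r p =>
      if r.contains p.2.1 then
        r.modify p.2.1 (0, [], PySem.Dict.empty)
          (fun v => (v.1 + 1, v.2.1 ++ [p.1], v.2.2.modify p.2.2 0 (· + 1)))
      else
        r.insert p.2.1 (1, [p.1], PySem.Dict.ofList [(p.2.2, 1)])) PySem.Dict.empty
  regions_set.items.map (fun e => (e.1, e.2.1, e.2.2.1, e.2.2.2.items))

-- ===== PRECONDITION & SPEC =====
def Spec_counter_node_regions (nodes : List (Int × Int)) (out : List (Int × Int × List Int × (List (Int × Int)))) : Prop := out = counter_node_regions_alt nodes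
instance (nodes : List (Int × Int)) (out : List (Int × Int × List Int × (List (Int × Int)))) : Decidable (Spec_counter_node_regions nodes out) := by unfold Spec_counter_node_regions; infer_instance

-- ===== CLAIM (what is proved, stated in full; the proofs are below) =====
def Claim_equal_counter_node_regions : Prop := ∀ (nodes : List (Int × Int)), Dom_counter_node_regions nodes → Spec_counter_node_regions nodes (counter_node_regions nodes)

-- ===== LEMMAS AND PROOFS =====

def pvNs (nodes : List (Int × Int)) : List Int := nodes.map (·.1)
def pvIdxs (nodes : List (Int × Int)) (k : Int) : List Int :=
  ((PySem.List.enumerate nodes 0).filter (fun p => p.2.1 == k)).map (·.1)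
def pvSubs (nodes : List (Int × Int)) (k : Int) : List Int :=
  ((PySem.List.enumerate nodes 0).filter (fun p => p.2.1 == k)).map (·.2.2)

theorem pv_enum_map_fst (nodes : List (Int × Int)) (s : Int) (k : Int) :
    (PySem.List.enumerate (nodes.map (·.1)) s).filter (fun p => p.2 == k)
      = ((PySem.List.enumerate nodes s).filter (fun p => p.2.1 == k)).map (fun p => (p.1, p.2.1)) := by
  induction nodes generalizing s with
  | nil => simp [PySem.List.enumerate_nil]
  | cons x xs ih =>
    simp only [List.map_cons, PySem.List.enumerate_cons, List.filter_cons]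
    by_cases h : x.1 = k <;> simp [h, ih]

theorem pv_getD_enum (nodes : List (Int × Int)) (p : Int × (Int × Int))
    (hp : p ∈ PySem.List.enumerate nodes 0) : PySem.List.pyGetD nodes p.1 (0, 0) = p.2 := by
  rw [PySem.List.mem_enumerate_iff] at hp
  obtain ⟨k, hk, rfl⟩ := hp
  simp [PySem.List.pyGetD_natCast, List.getD_eq_getElem?_getD, List.getElem?_eq_getElem hk]

theorem pv_mem_enum_fst (nodes : List (Int × Int)) (p : Int × (Int × Int))
    (hp : p ∈ PySem.List.enumerate nodes 0) : p.2.1 ∈ pvNs nodes := by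
  rw [PySem.List.mem_enumerate_iff] at hp
  obtain ⟨k, hk, rfl⟩ := hp
  exact List.mem_map_of_mem (List.getElem_mem hk)

def pvVal (nodes : List (Int × Int)) (k : Int) : Int × Int × List Int × PySem.Dict Int Int :=
  (k, ((pvNs nodes).count k : Int), pvIdxs nodes k, PySem.Dict.counter (pvSubs nodes k))
def pvClosed (nodes : List (Int × Int)) : List (Int × Int × List Int × PySem.Dict Int Int) :=
  (PySem.Set.ofList (pvNs nodes)).map (pvVal nodes)

theorem pv_foldl_append (l : List (Int × Int)) (acc : List Int) :
    l.foldl (fun acc node => acc ++ [node.1]) acc = acc ++ l.map (·.1) := by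
  induction l generalizing acc with
  | nil => simp
  | cons x xs ih => simp [List.foldl, ih]

theorem pv_A_closed (nodes : List (Int × Int)) :
    counter_node_regions nodes = (pvClosed nodes).map (fun e => (e.1, e.2.1, e.2.2.1, e.2.2.2.items)) := by
  unfold counter_node_regions
  dsimp only
  rw [pv_foldl_append, List.nil_append, PySem.Dict.items_counter]
  have hfresh := PySem.Dict.items_foldl_insert_fresh
    ((PySem.Set.ofList (nodes.map (·.1))).map (fun k => (k, (List.count k (nodes.map (·.1)) : Int))))
    (·.1)
    (fun kv => (kv.2,
        ((PySem.List.enumerate (nodes.map (·.1)) 0).filter (fun p => p.2 == kv.1)).map (·.1),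
        (PySem.Dict.counter (((PySem.List.enumerate (nodes.map (·.1)) 0).filter (fun p => p.2 == kv.1)).map
          (fun p => (PySem.List.pyGetD nodes p.1 (0, 0)).2))).items))
    PySem.Dict.empty
    (fun a _ => PySem.Dict.contains_empty _)
    (by simp [List.map_map, Function.comp_def])
  rw [hfresh]
  simp only [List.map_map, pvClosed, pvNs]
  refine List.map_congr_left fun k _ => ?_
  simp only [Function.comp]
  refine Prod.ext rfl (Prod.ext rfl (Prod.ext ?_ ?_))
  · show _ = pvIdxs nodes k
    rw [pv_enum_map_fst]
    simp [pvIdxs]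
  · show ((PySem.Dict.counter _).items : List (Int × Int)) = _
    rw [pv_enum_map_fst]
    congr 1
    show PySem.Dict.counter _ = PySem.Dict.counter (pvSubs nodes k)
    congr 1
    rw [List.map_map]
    refine List.map_congr_left fun p hp => ?_
    have := pv_getD_enum nodes p (List.mem_of_mem_filter hp)
    simp [Function.comp, this]

def pvStep (r : PySem.Dict Int (Int × List Int × PySem.Dict Int Int)) (p : Int × (Int × Int)) :
    PySem.Dict Int (Int × List Int × PySem.Dict Int Int) :=
  if r.contains p.2.1 then
    r.modify p.2.1 (0, [], PySem.Dict.empty)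
      (fun v => (v.1 + 1, v.2.1 ++ [p.1], v.2.2.modify p.2.2 0 (· + 1)))
  else
    r.insert p.2.1 (1, [p.1], PySem.Dict.ofList [(p.2.2, 1)])

theorem pv_B_inv (nodes : List (Int × Int)) :
    ((PySem.List.enumerate nodes 0).foldl pvStep PySem.Dict.empty).items = pvClosed nodes := by
  induction nodes using List.reverseRecOn with
  | nil => rfl
  | append_singleton xs x ih =>
    rw [PySem.List.enumerate_append, List.foldl_append]
    simp only [PySem.List.enumerate_cons, PySem.List.enumerate_nil, List.foldl_cons, List.foldl_nil]
    generalize hd : (PySem.List.enumerate xs 0).foldl pvStep PySem.Dict.empty = d at ih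
    have hkeys : d.keys = PySem.Set.ofList (pvNs xs) := by
      show d.items.map (·.1) = _
      rw [ih]
      simp [pvClosed, List.map_map, Function.comp_def, pvVal]
    have hnodup : d.keys.Nodup := by rw [hkeys]; exact PySem.Set.nodup_ofList _
    have hns : pvNs (xs ++ [x]) = pvNs xs ++ [x.1] := by simp [pvNs]
    have hcont : d.contains x.1 = decide (x.1 ∈ pvNs xs) := by
      rw [PySem.Dict.contains_eq_decide_mem_keys, hkeys]
      simp [PySem.Set.mem_ofList]
    have hvalcong : ∀ j ∈ pvNs xs, j ≠ x.1 → pvVal (xs ++ [x]) j = pvVal xs j := by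
      intro j _ hjne
      have h0 : List.count j [x.1] = 0 := List.count_eq_zero.2 (by simp [hjne])
      have hc : ((pvNs xs ++ [x.1]).count j : Int) = ((pvNs xs).count j : Int) := by
        simp only [List.count_append, h0, Nat.add_zero]
      have hflt : (PySem.List.enumerate (xs ++ [x]) 0).filter (fun p => p.2.1 == j)
          = (PySem.List.enumerate xs 0).filter (fun p => p.2.1 == j) := by
        rw [PySem.List.enumerate_append]
        simp [PySem.List.enumerate_cons, PySem.List.enumerate_nil, List.filter_append,
          Ne.symm hjne]
      simp [pvVal, pvIdxs, pvSubs, hns, hflt, h0]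
    by_cases hx : x.1 ∈ pvNs xs
    · rw [pvStep, hcont]
      simp only [hx, decide_true, if_true]
      have hmem : (x.1, (((pvNs xs).count x.1 : Int), pvIdxs xs x.1,
          PySem.Dict.counter (pvSubs xs x.1))) ∈ d.items := by
        rw [ih]
        exact List.mem_map_of_mem ((PySem.Set.mem_ofList _ _).2 hx)
      have hget : d.getD x.1 (0, [], PySem.Dict.empty)
          = (((pvNs xs).count x.1 : Int), pvIdxs xs x.1, PySem.Dict.counter (pvSubs xs x.1)) :=
        PySem.Dict.getD_of_mem_items _ hmem hnodup _
      have hctrue : d.contains x.1 = true := by rw [hcont]; simp [hx]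
      show (d.insert x.1 _).items = _
      rw [hget, PySem.Dict.items_insert_of_contains _ _ hctrue, ih]
      have hset : PySem.Set.ofList (pvNs xs ++ [x.1]) = PySem.Set.ofList (pvNs xs) := by
        rw [PySem.Set.ofList_append, PySem.Set.update_eq_append_filter]
        simp [hx]
      unfold pvClosed
      rw [hns, hset, List.map_map]
      refine List.map_congr_left fun j hj => ?_
      have hjns : j ∈ pvNs xs := (PySem.Set.mem_ofList _ _).1 hj
      by_cases hjx : j = x.1
      · subst hjx
        simp only [Function.comp, pvVal, BEq.rfl, if_true]
        refine Prod.ext rfl (Prod.ext ?_ (Prod.ext ?_ ?_))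
        · show ((pvNs xs).count x.1 : Int) + 1 = ((pvNs (xs ++ [x])).count x.1 : Int)
          rw [hns]
          simp [List.count_append]
        · show pvIdxs xs x.1 ++ [0 + (xs.length : Int)] = pvIdxs (xs ++ [x]) x.1
          simp only [pvIdxs, PySem.List.enumerate_append, PySem.List.enumerate_cons,
            PySem.List.enumerate_nil, List.filter_append, List.filter_cons, List.filter_nil]
          simp
        · show (PySem.Dict.counter (pvSubs xs x.1)).modify x.2 0 (· + 1)
            = PySem.Dict.counter (pvSubs (xs ++ [x]) x.1)
          have hsub : pvSubs (xs ++ [x]) x.1 = pvSubs xs x.1 ++ [x.2] := by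
            simp only [pvSubs, PySem.List.enumerate_append, PySem.List.enumerate_cons,
              PySem.List.enumerate_nil, List.filter_append, List.filter_cons, List.filter_nil]
            simp
          rw [hsub, PySem.Dict.counter_append_singleton]
      · simp only [Function.comp, pvVal]
        have : (j == x.1) = false := by simp [hjx]
        simp only [this, Bool.false_eq_true, if_false]
        exact (hvalcong j hjns hjx).symm
    · rw [pvStep, hcont]
      simp only [hx, decide_false, Bool.false_eq_true, if_false]
      have hcfalse : d.contains x.1 = false := by rw [hcont]; simp [hx]
      rw [PySem.Dict.items_insert_of_not_contains _ _ hcfalse, ih]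
      have hset : PySem.Set.ofList (pvNs xs ++ [x.1])
          = PySem.Set.ofList (pvNs xs) ++ [x.1] := by
        rw [PySem.Set.ofList_append, PySem.Set.update_eq_append_filter]
        congr 1
        have hof : PySem.Set.ofList [x.1] = [x.1] := rfl
        rw [hof]
        simp [hx]
      unfold pvClosed
      rw [hns, hset, List.map_append]
      congr 1
      · refine List.map_congr_left fun j hj => ?_
        have hjns : j ∈ pvNs xs := (PySem.Set.mem_ofList _ _).1 hj
        exact (hvalcong j hjns (fun h => hx (h ▸ hjns))).symm
      · have hflt : (PySem.List.enumerate xs 0).filter (fun p => p.2.1 == x.1) = [] := by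
          rw [List.filter_eq_nil_iff]
          intro p hp
          have := pv_mem_enum_fst xs p hp
          simp only [beq_iff_eq]
          intro hpe
          exact hx (hpe ▸ this)
        have hc0 : (pvNs xs).count x.1 = 0 := List.count_eq_zero.2 hx
        simp only [List.map_cons, List.map_nil, pvVal, hns]
        refine congrArg (fun z => [z]) ?_
        refine Prod.ext rfl (Prod.ext ?_ (Prod.ext ?_ ?_))
        · show (1 : Int) = ((pvNs xs ++ [x.1]).count x.1 : Int)
          simp [List.count_append, hc0]
        · show [0 + (xs.length : Int)] = pvIdxs (xs ++ [x]) x.1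
          simp only [pvIdxs, PySem.List.enumerate_append, PySem.List.enumerate_cons,
            PySem.List.enumerate_nil, List.filter_append, List.filter_cons, List.filter_nil, hflt]
          simp
        · show PySem.Dict.ofList [(x.2, 1)] = PySem.Dict.counter (pvSubs (xs ++ [x]) x.1)
          have hsub : pvSubs (xs ++ [x]) x.1 = [x.2] := by
            simp only [pvSubs, PySem.List.enumerate_append, PySem.List.enumerate_cons,
              PySem.List.enumerate_nil, List.filter_append, List.filter_cons, List.filter_nil, hflt]
            simp
          rw [hsub]
          rfl

-- ===== VERDICT (by name: the statement is the Claim_ definition above) =====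
theorem counter_node_regions_spec : Claim_equal_counter_node_regions := by
  intro nodes _
  show counter_node_regions nodes = counter_node_regions_alt nodes
  rw [pv_A_closed]
  show _ = ((PySem.List.enumerate nodes 0).foldl pvStep PySem.Dict.empty).items.map
    (fun e => (e.1, e.2.1, e.2.2.1, e.2.2.2.items))
  rw [pv_B_inv]
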